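/- GENERATED by tools/from_farm_form.py from prooffarm-gif/accepted/gif_decode.2/Lemmas.lean (a worked proof of the farm's unit `gif_decode.2`,
   accepted by the verdict) — do not edit. -/
import Gif.Spec.Units.gif_decode_2
import Gif.Spec.AllSegs

/-!
  Lemmas for the unit `gif_decode.2` (a body segment of the driver's protected function, WHERE THE READER IS MADE): there is NO forest
  and NO `Env` before the call of DGifOpen; the entry assertion `Filled` carries `Core` (heap-free) and `HeapInv H … (framesIn frames e)`.
  DGifOpen's return address 0x10aed4 (`ret14`) is not a cut of the design: the unit makes it one of its own. THE MODEL OF A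
  HEAP-LEVEL BODY SEGMENT (with farm.gif/worked/prog_main.1; the recipe: farm.gif/hints/driver.md).

      gd2_AtRet14      the assertion at `ret14`: `Core` + the heap `H'` DGifOpen left with its invariant + NULL or a forest with `GifOK`
      gd2_seg_call     0x10aeb3 … the two cursor stores … `call DGifOpen` … 0x10aed4 (`gd2_AtRet14`)
      gd2_seg_tail     0x10aed4 … `test rax, rax ; je`: not NULL: 0x10aedd (`AfterOpen`); NULL: 0x10b000 … the two checked stores into the
                       report … 0x10afdb (`Done`)

  THE TREE'S LEMMAS IT USES (nothing general is proved here):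
      HeapPre.at_call                  `HeapPre` at a callee's entry from `Filled.inv` and ONE stack window (it may reach ABOVE the body's
                                       `rsp`: the stores into the own frame's cursor)                                      FrameCarry.lean §5
      HeapInv.stack_windows            `HeapInv` and `Consts` through the check calls' return addresses and the report    FrameCarry.lean §5
      LiveIn.of_rest                   the input of the pre under the heap and the frames of the moment                    Carry.lean §4
      CursorOK.make                    `CursorOK` from the two fields just stored                                          Carry.lean §11
      gif_decode.Core.carry, .carry_eq `Core` behind the callee and at every exit, from a footprint of `gif_decode.BodyWin`s   DriverCarry.lean §2
      gif_decode.ctx, .report_above, .reportLive                                                                           Seg_gif_decode.lean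

  THE SEVEN CLAUSES OF DGifOpen'S PRE at the call (`pre_10aecf`), from `Filled`:
      HeapPre    `HeapPre.at_call`: `Filled.inv` through ONE footprint window of the three stack stores (`u_same`), the static
                 clauses from the function's own `HeapPre`
      Ctx        `gif_decode.ctx` (the cursor is the second object of the OWN frame)
      CursorOK   `CursorOK.make` from the two reads `u_read` finds in `w_mem`; `in + n` does not wrap (`LiveIn.inside`)
      Consts     `Core.consts` through the same footprint (`Consts.sameExcept`)
      rdi, rsi   `u_omega`, `decide`
      ErrPtr     `LiveIn.own` with the FIRST object of the own frame named by its numbers, the stack-region bounds, 12 bytes below the cursor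
-/

open X86 X86.User Asan ProgX.Base ProgX.Base.Spec Gif.Spec

set_option maxRecDepth 4000
set_option maxHeartbeats 4000000

namespace Gif.Spec.gif_decode_2

/-- **At 10AED4H (ret14), `DGifOpen(&cursor, mem_read, &error)` has returned**: `Core` (its `consts` from DGifOpen's post); A heap `H'`
at the place of `H` with its invariant, the own frame active, the clean stack ending at the body's `rsp`; `rax` is NULL, or the `gif`
of a forest `F'` with the state invariant for THE READER OF THIS FRAME and no counted image (`F'.saved = none`: `F'.Complete`). -/
structure gd2_AtRet14 (H : Heap) (rest : List Obj) (frames : List (Nat × FrameLayout)) (u₀ e : State)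
    (ret : Word) (v : State) : Prop where
  core : gif_decode.Core Gif.L.gif_decode.ret14 H rest frames u₀ e ret v
  heap : ∃ H', SameRegion H H' ∧
    HeapInv H' rest (gif_decode.framesIn frames e) ((e.reg .rsp).toNat - 136) v.mem ∧
    ((v.reg .rax).toNat = 0 ∨
      ∃ F', (v.reg .rax).toNat = F'.gif ∧ GifOK H' F' (gif_decode.reader e) v.mem ∧ F'.saved = none)

/-- **10AEB3H … the call of DGifOpen … 10AED4H (ret14)** (gif_driver.c:199-202): `cursor.cur = in` (`[rsp+0x40]` = RA − 72),
`cursor.end = in + n` (`[rsp+0x48]` = RA − 64): two unchecked stores into the own frame's object; `rdx = &error` (RA − 88),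
`esi = &mem_read`, `rdi = &cursor`. DGifOpen's precondition: the seven clauses as the file header lists them. Behind the call `Core`
by `Core.carry`: the three stores and DGifOpen's footprint (its stack, the heap's region and shadow, `error`, `cursor.cur`) lie below
RA − 56 or in `[800000H, 1000020H)`. -/
theorem gd2_seg_call (Lay : Layout) (hLay : Lay.hi = 0x1000000) (μ : Microarch) (hμ : UserX.MicroOK μ) (u₀ : State)
    (hcode : HasCodeNat Lay u₀ Gif.L.gif_decode.entry Gif.Code.code_gif_decode.nat Gif.L.gif_decode.size)
    (H : Heap) (rest : List Obj) (frames : List (Nat × FrameLayout)) (e : State) (ret : Word)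
    (h_DGifOpen : Calls Lay μ ProgX.Base.WayInv (ProgX.Base.conv u₀) Gif.L.DGifOpen.entry
      (Gif.Spec.DGifOpen.spec H rest (gif_decode.framesIn frames e) (gif_decode.reader e)))
    (v : State) (hat : gif_decode.Filled H rest frames u₀ e ret v) :
    ReachVia Lay μ ProgX.Base.WayInv v (gd2_AtRet14 H rest frames u₀ e ret) := by
  -- 1. THE PRELUDE OF A HEAP-LEVEL BODY SEGMENT: `Core` stays whole (fields by projection), only its `pre` is taken apart
  obtain ⟨hcore, c_rbp, hinv⟩ := hat
  have he := hcore.entry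
  v_entry he
  have hpre := hcore.pre
  obtain ⟨hheap, hglob, hconsts0, hin, hrep, hrep_lo, hrep_hi⟩ := hcore.pre
  have w_rip := hcore.rip
  have c_rsp : v.reg .rsp = e.reg .rsp - 136 := hcore.rsp
  have c_r13 : v.reg .r13 = e.reg .rdi := hcore.r13
  have c_rbx : v.reg .rbx = e.reg .rdx := hcore.rbx
  have w_kept : RegsKept [.rsp] v v := RegsKept.refl _ _
  have w_eq : Mem.EqOn ProgX.Base.L.textLo ProgX.Base.L.textHi u₀.mem v.mem := ProgX.Base.conv_code_eqOn hcore.code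
  have hdf := (show abiInv _ from hcore.abi).1
  have hmx := (show abiInv _ from hcore.abi).2
  have hsse := ProgX.Base.sseOK_of_abiInv hcore.abi
  -- the report lies at or above RA + 8 (BEFORE the walk: the placement of every store uses it)
  have hrab := gif_decode.report_above hpre
  -- 2. THE WALK, to the call's return address (a private cut)
  u_walk hcode [hμ.vendor] until [Gif.L.gif_decode.ret14] span [ProgX.Base.L.textLo, ProgX.Base.L.textHi] side (v_side)
  case call_inv =>
    v_inv
  case pre_10aecf =>
    -- 3. DGIFOPEN'S PRECONDITION. Three stack stores since `v`: the two fields of the cursor (own frame), the return address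
    have hctx : Ctx rest (gif_decode.framesIn frames e) (gif_decode.reader e) := gif_decode.ctx hpre (by omega)
    have hs : Mem.SameExcept [⟨(e.reg .rsp).toNat - 992, (e.reg .rsp).toNat⟩] v.mem s_10aecf.mem := by
      rw [w_mem]
      u_same
    have hpre' : HeapPre H rest (gif_decode.framesIn frames e) s_10aecf := by
      refine HeapPre.at_call hheap (SameRegion.refl H) hinv hs (by omega) ?_ ?_ ?_
      · rw [w_rsp]
        u_omega
      · rw [w_rsp]
        u_omega
      · rw [w_rsp]
        u_omega
    have hconsts' : Consts s_10aecf.mem := by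
      apply hcore.consts.sameExcept hs
      intro w hw
      have hw_eq := List.mem_singleton.mp hw
      rw [hw_eq]
      right
      show 0x14139a ≤ (e.reg .rsp).toNat - 992
      omega
    -- the word addition `in + n` does not wrap
    have hsum : (e.reg .rsi + e.reg .rdi).toNat = (e.reg .rdi).toNat + (e.reg .rsi).toNat := by
      rcases hin with h0 | hl
      · u_omega
      · have hl' := hl.of_rest H (gif_decode.framesIn frames e)
        by_cases hn : 0 < (e.reg .rsi).toNat
        · have hr := hl'.inside hinv.shadow hn
          u_omega
        · u_omega
    -- THE READER: the two fields just stored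
    have l_cur : rd s_10aecf.mem (gif_decode.reader e).cur 8 = (gif_decode.reader e).inB := by
      rw [← rd_eq_readLE s_10aecf.mem (e.reg .rsp - 72) _ 8 (by u_omega), w_mem]
      u_read
    have l_end : rd s_10aecf.mem ((gif_decode.reader e).cur + 8) 8 = (gif_decode.reader e).inB + (gif_decode.reader e).inN := by
      rw [← rd_eq_readLE s_10aecf.mem (e.reg .rsp - 64) _ 8 (by u_omega), w_mem, ← hsum]
      u_read
    -- `&error`: the first object of the own frame (base + 48 = RA − 88, 4 bytes), 12 bytes below the cursor
    have ho : (⟨(e.reg .rsp).toNat - 136 + 48, 4, .stack⟩ : Obj) ∈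
        Gif.Frames.gif_decode.objsAt ((e.reg .rsp).toNat - 136) := List.mem_cons_self
    have e_rdx : (s_10aecf.reg .rdx).toNat = (e.reg .rsp).toNat - 88 := by
      rw [w_rdx]
      u_omega
    have herr : ErrPtr H rest (gif_decode.framesIn frames e) (gif_decode.reader e) (s_10aecf.reg .rdx).toNat := by
      right
      rw [e_rdx]
      refine ⟨LiveIn.own _ ho (by omega) (by omega), by omega, by omega, Or.inl ?_⟩
      -- (`(reader e).cur` is a number by definition, but `omega` does not reduce it: `show` in numbers)
      show (e.reg .rsp).toNat - 88 + 4 ≤ (e.reg .rsp).toNat - 72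
      omega
    -- the seven clauses
    refine ⟨hpre', hctx, CursorOK.make l_cur l_end, hconsts', ?_, ?_, herr⟩
    · rw [w_rdi]
      show (e.reg .rsp - 72).toNat = (e.reg .rsp).toNat - 72
      u_omega
    · rw [w_rsi]
      decide
  -- 4. 0x10aed4 (ret14): DGIFOPEN HAS RETURNED, with A heap `H'`, its invariant at the body's stack pointer, NULL or a forest
  obtain ⟨H', hreg, hinv1, _, _, _, hres⟩ := w_post
  have e_top : (s_10aecf.reg .rsp).toNat + 8 = (e.reg .rsp).toNat - 136 := by
    rw [w_rsp_10aecf]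
    u_omega
  rw [e_top] at hinv1
  v_after_call w_rsp_10aecf w_mem_10aecf
  simp only [w_rdx_10aecf] at w_same
  -- the footprint since `v`: the cursor's two fields (RA − 72, RA − 64), the pushed return address, DGifOpen's stack, `error`
  -- (RA − 88), `cursor.cur` (RA − 72): all below RA − 56; the heap's region and shadow
  have hsame1 : Mem.SameExcept
      [⟨(e.reg .rsp).toNat - 992, (e.reg .rsp).toNat - 56⟩,
       ⟨0x800000, 0x1000020⟩] v.mem s_10aecfr.mem := by u_same
  have hwin1 : ∀ x, x ∈ ([⟨(e.reg .rsp).toNat - 992, (e.reg .rsp).toNat - 56⟩, ⟨0x800000, 0x1000020⟩] : List Span) →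
      gif_decode.BodyWin e x := by
    intro x hx
    simp only [List.mem_cons, List.mem_nil_iff, or_false] at hx
    unfold gif_decode.BodyWin
    rcases hx with rfl | rfl
    · left
      simp only
      omega
    · right
      left
      simp only
      omega
  -- `Core` at the returned state: the saved registers, the return address and the constants are met by no window
  have hcore1 := hcore.carry (cut' := Gif.L.gif_decode.ret14) w_rip w_rsp (w_kept.get .r12 rfl) (w_kept.get .r13 rfl)
    (w_kept.get .rbx rfl) (w_kept.get .r15 rfl) hsame1 hwin1 w_code w_inv
  refine ReachVia.done ?_
  exact {
    core := hcore1
    heap := by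
      refine ⟨H', hreg, hinv1, ?_⟩
      rcases hres with h0 | ⟨F', hgif, hok, _, hsaved, _⟩
      · exact Or.inl h0
      · exact Or.inr ⟨F', hgif, hok, hsaved⟩
  }

/-- **10AED4H (ret14) … 10AEDDH, or 10B000H … 10AFDBH** (gif_driver.c:203-206). `test rax, rax ; je`. Not NULL: the post's forest,
`AfterOpen` with the heap `H'` (nothing stored). NULL (the MACHINE's `rax = 0`; nothing of the post's disjunction is needed):
`ebp = error`, the checked store `report->open_error` (`report + 4`), `rbp = cursor.cur − in`, the checked store `report->consumed`
(`report + 48`): both checks by `gif_decode.reportLive` for the heap `H'`; the four stores since `ret14` (two return addresses of the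
check routines, two fields of the report) lie in the stack region: `HeapInv.stack_windows`; `Core` by `Core.carry`. `Done` with `H'`. -/
theorem gd2_seg_tail (Lay : Layout) (hLay : Lay.hi = 0x1000000) (μ : Microarch) (hμ : UserX.MicroOK μ) (u₀ : State)
    (hcode : HasCodeNat Lay u₀ Gif.L.gif_decode.entry Gif.Code.code_gif_decode.nat Gif.L.gif_decode.size)
    (H : Heap) (rest : List Obj) (frames : List (Nat × FrameLayout)) (e : State) (ret : Word)
    (h_asan_store4_noabort : Asan.SmallCheck Lay μ ProgX.Base.WayInv (ProgX.Base.CodeOK u₀) [.rax, .rcx, .rdx] 4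
      ProgX.Base.L.__asan_store4_noabort.entry)
    (h_asan_store8_noabort : Asan.SmallCheck Lay μ ProgX.Base.WayInv (ProgX.Base.CodeOK u₀) [.rax, .rcx, .rdx] 8
      ProgX.Base.L.__asan_store8_noabort.entry)
    (v : State) (hat : gd2_AtRet14 H rest frames u₀ e ret v) :
    ReachVia Lay μ ProgX.Base.WayInv v (fun w =>
      (∃ (Hc : Heap) (Fc : Forest), gif_decode.AfterOpen H rest frames Hc Fc u₀ e ret w) ∨
      (∃ (Hc : Heap), gif_decode.Done H rest frames Hc u₀ e ret w)) := by
  -- 1. THE PRELUDE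
  obtain ⟨hcore, H', hreg, hinv, hres⟩ := hat
  have he := hcore.entry
  v_entry he
  have hpre := hcore.pre
  obtain ⟨hheap, hglob, hconsts0, hin, hrep, hrep_lo, hrep_hi⟩ := hcore.pre
  have w_rip := hcore.rip
  have c_rsp : v.reg .rsp = e.reg .rsp - 136 := hcore.rsp
  have c_r13 : v.reg .r13 = e.reg .rdi := hcore.r13
  have c_rbx : v.reg .rbx = e.reg .rdx := hcore.rbx
  -- the tested register as a VARIABLE (the branch fact then speaks of `z`)
  obtain ⟨z, c_rax⟩ : ∃ z, v.reg .rax = z := ⟨_, rfl⟩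
  rw [c_rax] at hres
  have w_kept : RegsKept [.rsp] v v := RegsKept.refl _ _
  have w_eq : Mem.EqOn ProgX.Base.L.textLo ProgX.Base.L.textHi u₀.mem v.mem := ProgX.Base.conv_code_eqOn hcore.code
  have hdf := (show abiInv _ from hcore.abi).1
  have hmx := (show abiInv _ from hcore.abi).2
  have hsse := ProgX.Base.sseOK_of_abiInv hcore.abi
  -- the report: above RA + 8, and live under the heap of THIS state (both BEFORE the walk)
  have hrab := gif_decode.report_above hpre
  have hrl : LiveIn (H'.liveObjs ++ rest) (gif_decode.framesIn frames e) (e.reg .rdx).toNat 64 :=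
    gif_decode.reportLive hpre H' _ _ _ (Nat.le_refl _) (Nat.le_refl _)
  -- 2. THE WALK, to both exit cuts
  u_walk hcode [hμ.vendor] until [Gif.L.gif_decode.at_10aedd, Gif.L.gif_decode.at_10afdb] span [ProgX.Base.L.textLo, ProgX.Base.L.textHi] side (v_side)
  case check_10b008 =>
    -- gif_driver.c:204 the store of `report->open_error`: 4 bytes inside the report
    have hun : ShadowUntouched v.mem s_10b008.mem := by v_untouched
    exact hrl.accSmall hinv.shadow hun _ 4 (by decide) (by u_omega) (by u_omega)
  case check_10b01c =>
    -- gif_driver.c:205 the store of `report->consumed`: 8 bytes inside the report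
    have hun : ShadowUntouched v.mem s_10b01c.mem := by v_untouched
    exact hrl.accSmall hinv.shadow hun _ 8 (by decide) (by u_omega) (by u_omega)
  · -- 3a. 0x10afdb FROM 0x10b025: DGifOpen returned NULL; `open_error` and `consumed` are recorded; the heap is `H'`
    -- the four stores since `v`: two check calls' return addresses (stack), two fields of the report (a caller's stack object)
    have hs : Mem.SameExcept
        [⟨(e.reg .rsp).toNat - 992, (e.reg .rsp).toNat - 136⟩,
         ⟨(e.reg .rdx).toNat, (e.reg .rdx).toNat + 64⟩] v.mem s_10b025.mem := by
      rw [w_mem]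
      u_same
    have hbase' : H'.base = 0x800000 := hreg.1.trans hheap.base
    -- both windows lie in the stack region: the heap's invariant holds on
    have hoff : ∀ w, w ∈ ([⟨(e.reg .rsp).toNat - 992, (e.reg .rsp).toNat - 136⟩,
        ⟨(e.reg .rdx).toNat, (e.reg .rdx).toNat + 64⟩] : List Span) → 0x700000 ≤ w.lo ∧ w.hi ≤ 0x800000 := by
      intro w hw
      simp only [List.mem_cons, List.mem_nil_iff, or_false] at hw
      rcases hw with rfl | rfl
      · simp only
        omega
      · exact ⟨hrep_lo, hrep_hi⟩
    obtain ⟨hinv1, _⟩ := hinv.stack_windows hbase' hs hoff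
    -- both windows are the body's: `Core` holds on
    have hwin : ∀ x, x ∈ ([⟨(e.reg .rsp).toNat - 992, (e.reg .rsp).toNat - 136⟩,
        ⟨(e.reg .rdx).toNat, (e.reg .rdx).toNat + 64⟩] : List Span) → gif_decode.BodyWin e x := by
      intro x hx
      simp only [List.mem_cons, List.mem_nil_iff, or_false] at hx
      unfold gif_decode.BodyWin
      rcases hx with rfl | rfl
      · left
        simp only
        omega
      · right
        right
        simp only
        omega
    have habi : (conv u₀).inv s_10b025 := by
      refine ProgX.Base.abiInv_of ?_ ?_
      · rw [w_flags]
        exact w_df_10b01c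
      · rw [w_mxcsr]
        exact hmx
    have hcore' := hcore.carry (cut' := Gif.L.gif_decode.at_10afdb) w_rip w_rsp (w_kept.get .r12 rfl) (w_kept.get .r13 rfl)
      (w_kept.get .rbx rfl) (w_kept.get .r15 rfl) hs hwin (ProgX.Base.conv_code_in w_eq) habi
    refine ReachVia.done (Or.inr ⟨H', ?_⟩)
    exact {
      core := hcore'
      region := hreg
      inv := hinv1
    }
  · -- 3b. 0x10aedd: DGifOpen returned a decoder (`rax ≠ 0`): the forest `F'` of its post; NOTHING WAS STORED
    rcases hres with h0 | ⟨F', hgif, hok, hsaved⟩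
    · exact absurd h0 hbr_10aed7
    · have habi : (conv u₀).inv s_10aed7 := by
        refine ProgX.Base.abiInv_of ?_ ?_
        · rw [w_flags]
          simp only [X86.User.df_setStatus]
          exact hdf
        · rw [w_mxcsr]
          exact hmx
      have hcore' := hcore.carry_eq (cut' := Gif.L.gif_decode.at_10aedd) w_rip w_rsp (w_kept.get .r12 rfl) (w_kept.get .r13 rfl)
        (w_kept.get .rbx rfl) (w_kept.get .r15 rfl) w_mem (ProgX.Base.conv_code_in w_eq) habi
      refine ReachVia.done (Or.inl ⟨H', F', ?_⟩)
      exact {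
        open_ := {
          core := hcore'
          region := hreg
          inv := by
            rw [w_mem]
            exact hinv
          ok := by
            rw [w_mem]
            exact hok
          complete := Forest.complete_of_saved_none hsaved
        }
        rax := by
          rw [w_kept.get .rax rfl, c_rax]
          exact hgif
      }

end Gif.Spec.gif_decode_2
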